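-- pv_equiv track=rewrite | github.com/SantiagoIvan/string-maze | main.py | depthfirst_recursive
-- ===== SOURCE A (Python) =====
-- def get_element(maze, row, col, dimension):
--     row_is_correct = row>=0 and row < dimension
--     col_is_correct = col>=0 and col < dimension
--     if (not row_is_correct) or (not col_is_correct): return
--
--     start_position = (dimension+1) * row
--     # me muevo segun la cantidad que tenga cada fila para saber la posicion
--     # inicial, tengo que contar el \n, por eso el +1
--
--     return maze[start_position + col] if start_position + col < len(maze) else None
--
-- def depthfirst_recursive(maze, src, visited, dimension):
--     if src in visited: return False
--     if src == (dimension-1, dimension - 1):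
--         return True
--
--     (row, column) = src
--     elem = get_element(maze, row, column, dimension)
--     if (not elem) or (elem == 'W'): return False
--
--     visited.add(src)
--
--     if depthfirst_recursive(maze, (row-1, column), visited, dimension): return True
--     if depthfirst_recursive(maze, (row, column-1), visited, dimension): return True
--     if depthfirst_recursive(maze, (row+1, column), visited, dimension): return True
--     if depthfirst_recursive(maze, (row, column+1), visited, dimension): return True
--     return False
-- ===== SOURCE B (Python) =====
-- def get_element(maze, row, col, dimension):
--     row_is_correct = row>=0 and row < dimension
--     col_is_correct = col>=0 and col < dimension
--     if (not row_is_correct) or (not col_is_correct): return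
--     start_position = (dimension+1) * row
--     return maze[start_position + col] if start_position + col < len(maze) else None
--
-- def depthfirst_recursive(maze, src, visited, dimension):
--     # Iterative DFS with an explicit stack instead of recursion; same
--     # exploration order (up, left, down, right) and the same mutation of
--     # the caller's visited set (cells are marked when popped and expanded).
--     stack = [src]
--     while stack:
--         cell = stack.pop()
--         if cell in visited:
--             continue
--         if cell == (dimension - 1, dimension - 1):
--             return True
--         (row, column) = cell
--         elem = get_element(maze, row, column, dimension)
--         if elem and elem != 'W':
--             visited.add(cell)
--             stack.append((row, column + 1))
--             stack.append((row + 1, column))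
--             stack.append((row, column - 1))
--             stack.append((row - 1, column))
--     return False
-- ===== Notes on version B (the rewrite author's own statement) =====
-- stated objective: idiomatic
-- what changed: The recursive four-way DFS is replaced by an iterative DFS driven by an explicit stack (pop a cell; skip if visited; goal test; if open, mark it and push the four neighbours in reverse order so the pop order matches the recursion), eliminating recursion entirely.
import Mathlib
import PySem

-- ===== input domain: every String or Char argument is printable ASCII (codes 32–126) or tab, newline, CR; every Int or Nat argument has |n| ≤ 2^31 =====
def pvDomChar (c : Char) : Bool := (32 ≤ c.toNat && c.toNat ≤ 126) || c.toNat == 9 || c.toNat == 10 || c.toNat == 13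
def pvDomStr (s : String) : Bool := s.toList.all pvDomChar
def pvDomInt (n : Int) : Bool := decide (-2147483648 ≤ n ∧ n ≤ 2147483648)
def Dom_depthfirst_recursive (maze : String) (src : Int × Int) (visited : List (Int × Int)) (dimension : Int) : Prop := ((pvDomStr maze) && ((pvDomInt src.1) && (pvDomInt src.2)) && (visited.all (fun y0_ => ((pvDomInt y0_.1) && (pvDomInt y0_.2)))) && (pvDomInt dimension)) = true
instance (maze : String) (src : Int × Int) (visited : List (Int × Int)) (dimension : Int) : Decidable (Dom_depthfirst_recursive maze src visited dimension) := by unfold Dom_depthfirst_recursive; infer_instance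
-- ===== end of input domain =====

-- Port A = the recursive DFS from main.py; Port B = my iterative DFS with an explicit
-- stack (same exploration order). Python A and B both MUTATE the caller's `visited`
-- set (identically: each expanded cell is marked exactly when it is expanded); the
-- equivalence proved here is about the RETURN value, with the mutation threaded as state.


-- ===== PORT A =====

-- get_element, shared verbatim by both Python versions (works on maze.toList).
-- The subscript maze[start_position+col] is taken only under 0 ≤ index < len(maze),
-- so PySem.List.pyGet? is `some` there and returning it as the Option is exact.
def get_element (maze : List Char) (row col dimension : Int) : Option Char :=
  let row_is_correct := 0 ≤ row ∧ row < dimension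
  let col_is_correct := 0 ≤ col ∧ col < dimension
  if ¬ row_is_correct ∨ ¬ col_is_correct then none
  else
    let start_position := (dimension + 1) * row
    if start_position + col < (maze.length : Int) then
      PySem.List.pyGet? maze (start_position + col)
    else none

-- termination measure for A: number of in-range cells not yet visited.
-- (used only by the `termination_by`/`decreasing_by` clause of port A)
def aCells (dimension : Int) : List (Int × Int) :=
  (List.range dimension.toNat).flatMap
    (fun i => (List.range dimension.toNat).map (fun j => (Int.ofNat i, Int.ofNat j)))

def freeCount (dimension : Int) (visited : List (Int × Int)) : Nat :=
  (aCells dimension).countP (fun c => decide (c ∉ visited))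

-- a strict version of List.countP_mono_left (specific shape needed by the measure)
theorem countP_lt_of_witness {α : Type} (l : List α) (p q : α → Bool)
    (h : ∀ a ∈ l, q a = true → p a = true) (a : α) (ha : a ∈ l)
    (hp : p a = true) (hq : q a = false) : l.countP q < l.countP p := by
  induction l with
  | nil => cases ha
  | cons x xs ih =>
    rcases List.mem_cons.1 ha with rfl | hmem
    · rw [List.countP_cons, List.countP_cons, hp, hq]
      simpa using Nat.lt_succ_of_le
        (List.countP_mono_left (fun b hb => by
          have := h b (List.mem_cons_of_mem _ hb); simpa using this))
    · rw [List.countP_cons, List.countP_cons]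
      have := ih (fun b hb => h b (List.mem_cons_of_mem _ hb)) hmem
      cases hpx : p x <;> cases hqx : q x <;> simp_all <;> omega

theorem freeCount_le_of_subset (dimension : Int)
    (v w : List (Int × Int)) (h : ∀ x ∈ v, x ∈ w) :
    freeCount dimension w ≤ freeCount dimension v := by
  apply List.countP_mono_left
  intro c _ hc
  have hc' := of_decide_eq_true hc
  exact decide_eq_true (fun hm => hc' (h _ hm))

-- the two facts port A's termination clause cites by name (kept as named
-- theorems so the recursive definition only references them)
theorem mem_add_left {v : List (Int × Int)} {src x : Int × Int} (h : x ∈ v) :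
    x ∈ PySem.Set.add v src := by
  rw [PySem.Set.mem_add]; exact Or.inl h

theorem dfsA_dec (maze : List Char) (dimension : Int) (src : Int × Int)
    (v : List (Int × Int)) (hv : src ∉ v)
    (hcond : ¬ (get_element maze src.1 src.2 dimension = none ∨
                get_element maze src.1 src.2 dimension = some 'W')) :
    freeCount dimension (PySem.Set.add v src) < freeCount dimension v := by
  obtain ⟨e, he⟩ : ∃ e, get_element maze src.1 src.2 dimension = some e := by
    cases h : get_element maze src.1 src.2 dimension with
    | none => exact absurd (Or.inl h) hcond
    | some e => exact ⟨e, rfl⟩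
  have hb : 0 ≤ src.1 ∧ src.1 < dimension ∧ 0 ≤ src.2 ∧ src.2 < dimension := by
    simp only [get_element] at he
    split_ifs at he with h1 h2
    · rw [not_or, not_not, not_not] at h1
      exact ⟨h1.1.1, h1.1.2, h1.2.1, h1.2.2⟩
  have hr : src.1.toNat < dimension.toNat := by omega
  have hc : src.2.toNat < dimension.toNat := by omega
  have hsrc : src = (Int.ofNat src.1.toNat, Int.ofNat src.2.toNat) := by
    simp only [Int.ofNat_eq_natCast]
    rw [Int.toNat_of_nonneg hb.1, Int.toNat_of_nonneg hb.2.2.1]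
  have hmem : src ∈ aCells dimension := by
    rw [hsrc, aCells]
    exact List.mem_flatMap.2 ⟨src.1.toNat, List.mem_range.2 hr,
      List.mem_map_of_mem (List.mem_range.2 hc)⟩
  refine countP_lt_of_witness (aCells dimension) _ _ ?_ src hmem
    (decide_eq_true hv) (decide_eq_false (not_not_intro ?_))
  · intro a _ ha
    have ha' := of_decide_eq_true ha
    refine decide_eq_true (fun hm => ha' ?_)
    rw [PySem.Set.mem_add]; exact Or.inl hm
  · rw [PySem.Set.mem_add]; exact Or.inr rfl

-- recursive DFS of A, `visited` threaded as state; the subtype carries the invariant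
-- "visited only grows", used solely to justify termination.
def dfsA (maze : List Char) (dimension : Int) (src : Int × Int)
    (visited : List (Int × Int)) :
    {r : Bool × List (Int × Int) // ∀ x ∈ visited, x ∈ r.2} :=
  if hv : src ∈ visited then ⟨(false, visited), fun _ h => h⟩
  else if src = (dimension - 1, dimension - 1) then ⟨(true, visited), fun _ h => h⟩
  else
    -- elem = get_element(...); if (not elem) or (elem == 'W'): return False
    if hcond : get_element maze src.1 src.2 dimension = none ∨
               get_element maze src.1 src.2 dimension = some 'W' then
      ⟨(false, visited), fun _ h => h⟩
    else
      let v0 := PySem.Set.add visited src              -- visited.add(src)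
      have hsub0 : ∀ x ∈ visited, x ∈ v0 := fun _ h => mem_add_left h
      have hdec : freeCount dimension v0 < freeCount dimension visited :=
        dfsA_dec maze dimension src visited hv hcond
      let r1 := dfsA maze dimension (src.1 - 1, src.2) v0
      if r1.1.1 then ⟨(true, r1.1.2), fun x h => r1.2 x (hsub0 x h)⟩
      else
        have hle1 : freeCount dimension r1.1.2 < freeCount dimension visited :=
          lt_of_le_of_lt (freeCount_le_of_subset _ _ _ r1.2) hdec
        let r2 := dfsA maze dimension (src.1, src.2 - 1) r1.1.2
        if r2.1.1 then ⟨(true, r2.1.2), fun x h => r2.2 x (r1.2 x (hsub0 x h))⟩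
        else
          have hle2 : freeCount dimension r2.1.2 < freeCount dimension visited :=
            lt_of_le_of_lt (freeCount_le_of_subset _ _ _ r2.2) hle1
          let r3 := dfsA maze dimension (src.1 + 1, src.2) r2.1.2
          if r3.1.1 then ⟨(true, r3.1.2), fun x h => r3.2 x (r2.2 x (r1.2 x (hsub0 x h)))⟩
          else
            have hle3 : freeCount dimension r3.1.2 < freeCount dimension visited :=
              lt_of_le_of_lt (freeCount_le_of_subset _ _ _ r3.2) hle2
            let r4 := dfsA maze dimension (src.1, src.2 + 1) r3.1.2
            if r4.1.1 then
              ⟨(true, r4.1.2), fun x h => r4.2 x (r3.2 x (r2.2 x (r1.2 x (hsub0 x h))))⟩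
            else
              ⟨(false, r4.1.2), fun x h => r4.2 x (r3.2 x (r2.2 x (r1.2 x (hsub0 x h))))⟩
termination_by freeCount dimension visited
decreasing_by all_goals assumption

def depthfirst_recursive (maze : String) (src : Int × Int)
    (visited : List (Int × Int)) (dimension : Int) : Bool :=
  (dfsA maze.toList dimension src visited).1.1

-- ===== PORT B =====

-- termination measure for B: number of unvisited cells of the dimension × dimension
-- grid, enumerated row by row via Python-style ranges (independent of A's measure
-- over maze indices).
def bGrid (dimension : Int) : List (Int × Int) :=
  (PySem.List.pyRange 0 dimension 1).flatMap
    (fun r => (PySem.List.pyRange 0 dimension 1).map (fun c => (r, c)))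

def bFree (dimension : Int) (visited : List (Int × Int)) : Nat :=
  (bGrid dimension).countP (fun c => decide (c ∉ visited))

-- fact cited by port B's `decreasing_by`: expanding an unvisited open cell
-- strictly shrinks the number of free grid cells
theorem loopB_dec (maze : List Char) (dimension : Int)
    (visited : List (Int × Int)) (cell : Int × Int)
    (hv : cell ∉ visited)
    (hop : get_element maze cell.1 cell.2 dimension ≠ none ∧
           get_element maze cell.1 cell.2 dimension ≠ some 'W') :
    bFree dimension (PySem.Set.add visited cell) < bFree dimension visited := by
  obtain ⟨e, he⟩ : ∃ e, get_element maze cell.1 cell.2 dimension = some e := by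
    cases h : get_element maze cell.1 cell.2 dimension with
    | none => exact absurd h hop.1
    | some e => exact ⟨e, rfl⟩
  have hb : 0 ≤ cell.1 ∧ cell.1 < dimension ∧ 0 ≤ cell.2 ∧ cell.2 < dimension := by
    simp only [get_element] at he
    split_ifs at he with h1 h2
    · rw [not_or, not_not, not_not] at h1
      exact ⟨h1.1.1, h1.1.2, h1.2.1, h1.2.2⟩
  obtain ⟨r, c⟩ := cell
  have hmem : (r, c) ∈ bGrid dimension :=
    List.mem_flatMap.2 ⟨r, PySem.List.mem_pyRange_one.2 ⟨hb.1, hb.2.1⟩,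
      List.mem_map_of_mem (PySem.List.mem_pyRange_one.2 ⟨hb.2.2.1, hb.2.2.2⟩)⟩
  refine countP_lt_of_witness (bGrid dimension) _ _ ?_ (r, c) hmem
    (decide_eq_true hv) (decide_eq_false (not_not_intro ?_))
  · intro a _ ha
    have ha' := of_decide_eq_true ha
    refine decide_eq_true (fun hm => ha' ?_)
    rw [PySem.Set.mem_add]; exact Or.inl hm
  · rw [PySem.Set.mem_add]; exact Or.inr rfl

-- iterative DFS of B: the list is the stack, head = top (Python's list end / .pop());
-- the pushed neighbours are listed top-first, matching the reversed append order.
def loopB (maze : List Char) (dimension : Int) :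
    List (Int × Int) → List (Int × Int) → Bool
  | [], _ => false
  | cell :: stack, visited =>
    if hv : cell ∈ visited then loopB maze dimension stack visited
    else if cell = (dimension - 1, dimension - 1) then true
    else
      -- elem = get_element(...); if elem and elem != 'W': mark and push
      if hop : get_element maze cell.1 cell.2 dimension ≠ none ∧
               get_element maze cell.1 cell.2 dimension ≠ some 'W' then
        loopB maze dimension
          ((cell.1 - 1, cell.2) :: (cell.1, cell.2 - 1) ::
           (cell.1 + 1, cell.2) :: (cell.1, cell.2 + 1) :: stack)
          (PySem.Set.add visited cell)
      else loopB maze dimension stack visited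
termination_by stack visited => (bFree dimension visited, stack.length)
decreasing_by
  · exact Prod.Lex.right _ (Nat.lt_succ_self _)
  · exact Prod.Lex.left _ _ (loopB_dec maze dimension visited cell hv hop)
  · exact Prod.Lex.right _ (Nat.lt_succ_self _)

def depthfirst_recursive_alt (maze : String) (src : Int × Int)
    (visited : List (Int × Int)) (dimension : Int) : Bool :=
  loopB maze.toList dimension [src] visited

-- ===== PRECONDITION & SPEC =====
def Spec_depthfirst_recursive (maze : String) (src : Int × Int) (visited : List (Int × Int)) (dimension : Int) (out : Bool) : Prop := out = depthfirst_recursive_alt maze src visited dimension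
instance (maze : String) (src : Int × Int) (visited : List (Int × Int)) (dimension : Int) (out : Bool) : Decidable (Spec_depthfirst_recursive maze src visited dimension out) := by unfold Spec_depthfirst_recursive; infer_instance

-- ===== CLAIM (what is proved, stated in full; the proofs are below) =====
def Claim_equal_depthfirst_recursive : Prop := ∀ (maze : String) (src : Int × Int) (visited : List (Int × Int)) (dimension : Int), Dom_depthfirst_recursive maze src visited dimension → Spec_depthfirst_recursive maze src visited dimension (depthfirst_recursive maze src visited dimension)

-- ===== LEMMAS AND PROOFS =====

-- the four step equations of the stack machine (one per branch of loopB)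
theorem loopB_step_visited (maze : List Char) (dimension : Int)
    (cell : Int × Int) (stack visited : List (Int × Int)) (hv : cell ∈ visited) :
    loopB maze dimension (cell :: stack) visited = loopB maze dimension stack visited := by
  rw [loopB, dif_pos hv]

theorem loopB_step_goal (maze : List Char) (dimension : Int)
    (cell : Int × Int) (stack visited : List (Int × Int)) (hv : cell ∉ visited)
    (hg : cell = (dimension - 1, dimension - 1)) :
    loopB maze dimension (cell :: stack) visited = true := by
  rw [loopB, dif_neg hv, if_pos hg]

theorem loopB_step_blocked (maze : List Char) (dimension : Int)
    (cell : Int × Int) (stack visited : List (Int × Int)) (hv : cell ∉ visited)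
    (hg : cell ≠ (dimension - 1, dimension - 1))
    (hcond : get_element maze cell.1 cell.2 dimension = none ∨
             get_element maze cell.1 cell.2 dimension = some 'W') :
    loopB maze dimension (cell :: stack) visited = loopB maze dimension stack visited := by
  rw [loopB, dif_neg hv, if_neg hg, dif_neg]
  intro hop
  rcases hcond with hn | hw
  · exact hop.1 hn
  · exact hop.2 hw

theorem loopB_step_open (maze : List Char) (dimension : Int)
    (cell : Int × Int) (stack visited : List (Int × Int)) (hv : cell ∉ visited)
    (hg : cell ≠ (dimension - 1, dimension - 1)) (e : Char)
    (hel : get_element maze cell.1 cell.2 dimension = some e) (hw : e ≠ 'W') :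
    loopB maze dimension (cell :: stack) visited =
      loopB maze dimension
        ((cell.1 - 1, cell.2) :: (cell.1, cell.2 - 1) ::
         (cell.1 + 1, cell.2) :: (cell.1, cell.2 + 1) :: stack)
        (PySem.Set.add visited cell) := by
  rw [loopB, dif_neg hv, if_neg hg, dif_pos]
  refine ⟨by simp [hel], ?_⟩
  rw [hel]
  intro hc
  exact hw (by injection hc)

-- one step of the stack machine = one recursive call of A
theorem loopB_sim (maze : List Char) (dimension : Int) :
    ∀ N visited, freeCount dimension visited < N →
    ∀ src stack,
      loopB maze dimension (src :: stack) visited =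
        (if (dfsA maze dimension src visited).1.1 then true
         else loopB maze dimension stack (dfsA maze dimension src visited).1.2) := by
  intro N
  induction N with
  | zero => intro v h src stack; exact absurd h (Nat.not_lt_zero _)
  | succ N ih =>
    intro v hN src stack
    by_cases hv : src ∈ v
    · rw [loopB_step_visited maze dimension src stack v hv, dfsA]
      simp [hv]
    · by_cases hg : src = (dimension - 1, dimension - 1)
      · rw [loopB_step_goal maze dimension src stack v hv hg, dfsA]
        subst hg
        simp [hv]
      · cases hel : get_element maze src.1 src.2 dimension with
        | none =>
          rw [loopB_step_blocked maze dimension src stack v hv hg (Or.inl hel), dfsA]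
          simp [hv, hg, hel]
        | some e =>
          by_cases hw : e = 'W'
          · rw [loopB_step_blocked maze dimension src stack v hv hg (Or.inr (hw ▸ hel)), dfsA]
            simp [hv, hg, hel, hw]
          · have hcond : ¬ (get_element maze src.1 src.2 dimension = none ∨
                get_element maze src.1 src.2 dimension = some 'W') := by
              simp [hel, hw]
            have hdec : freeCount dimension (PySem.Set.add v src) <
                freeCount dimension v := dfsA_dec maze dimension src v hv hcond
            have h0 : freeCount dimension (PySem.Set.add v src) < N := by omega
            rw [loopB_step_open maze dimension src stack v hv hg e hel hw, dfsA]
            simp only [dif_neg hv, if_neg hg, dif_neg hcond]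
            rw [ih (PySem.Set.add v src) h0 (src.1 - 1, src.2) _]
            have h1 : freeCount dimension (dfsA maze dimension (src.1 - 1, src.2) (PySem.Set.add v src)).1.2 < N :=
              lt_of_le_of_lt (freeCount_le_of_subset _ _ _ (dfsA maze dimension (src.1 - 1, src.2) (PySem.Set.add v src)).2) h0
            rw [ih _ h1 (src.1, src.2 - 1) _]
            have h2 : freeCount dimension (dfsA maze dimension (src.1, src.2 - 1) (dfsA maze dimension (src.1 - 1, src.2) (PySem.Set.add v src)).1.2).1.2 < N :=
              lt_of_le_of_lt (freeCount_le_of_subset _ _ _ (dfsA maze dimension (src.1, src.2 - 1) (dfsA maze dimension (src.1 - 1, src.2) (PySem.Set.add v src)).1.2).2) h1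
            rw [ih _ h2 (src.1 + 1, src.2) _]
            have h3 : freeCount dimension (dfsA maze dimension (src.1 + 1, src.2) (dfsA maze dimension (src.1, src.2 - 1) (dfsA maze dimension (src.1 - 1, src.2) (PySem.Set.add v src)).1.2).1.2).1.2 < N :=
              lt_of_le_of_lt (freeCount_le_of_subset _ _ _ (dfsA maze dimension (src.1 + 1, src.2) (dfsA maze dimension (src.1, src.2 - 1) (dfsA maze dimension (src.1 - 1, src.2) (PySem.Set.add v src)).1.2).1.2).2) h2
            rw [ih _ h3 (src.1, src.2 + 1) _]
            by_cases b1 : (dfsA maze dimension (src.1 - 1, src.2) (PySem.Set.add v src)).1.1 = true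
            · simp [b1]
            · by_cases b2 : (dfsA maze dimension (src.1, src.2 - 1) (dfsA maze dimension (src.1 - 1, src.2) (PySem.Set.add v src)).1.2).1.1 = true
              · simp [b1, b2]
              · by_cases b3 : (dfsA maze dimension (src.1 + 1, src.2) (dfsA maze dimension (src.1, src.2 - 1) (dfsA maze dimension (src.1 - 1, src.2) (PySem.Set.add v src)).1.2).1.2).1.1 = true
                · simp [b1, b2, b3]
                · by_cases b4 : (dfsA maze dimension (src.1, src.2 + 1) (dfsA maze dimension (src.1 + 1, src.2) (dfsA maze dimension (src.1, src.2 - 1) (dfsA maze dimension (src.1 - 1, src.2) (PySem.Set.add v src)).1.2).1.2).1.2).1.1 = true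
                  · simp [b1, b2, b3, b4]
                  · simp [b1, b2, b3, b4]

-- ===== VERDICT (by name: the statement is the Claim_ definition above) =====
theorem depthfirst_recursive_spec : Claim_equal_depthfirst_recursive := by
  intro maze src visited dimension _
  unfold Spec_depthfirst_recursive depthfirst_recursive depthfirst_recursive_alt
  rw [loopB_sim maze.toList dimension (freeCount dimension visited + 1)
      visited (Nat.lt_succ_self _) src []]
  split
  · next h => rw [h]
  · next h => simp at h; rw [h, loopB]
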